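-- pv_equiv track=rewrite | github.com/thudsonbu/dip | 2020/no_repeating_letter.py | get_letters_to_poll
-- ===== SOURCE A (Python) =====
-- def get_letters_to_poll(letter_dict):
--     sort_letters = sorted(letter_dict.items(), key=lambda x: x[1], reverse=True)
--     highest = sort_letters[0][1]
--     if highest == 0:
--         return [], []
--     priority_letters = []
--     other_pollable_letters = []
--     for letter in sort_letters:
--         if letter[1] == highest:
--             priority_letters.append(letter[0])
--         elif letter[1] > 0:
--             other_pollable_letters.append(letter[0])
--     return priority_letters, other_pollable_letters
-- ===== SOURCE B (Python) =====
-- def get_letters_to_poll(letter_dict):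
--     highest = max(letter_dict.values())
--     if highest == 0:
--         return [], []
--     priority = [k for k, v in letter_dict.items() if v == highest]
--     middle = sorted((item for item in letter_dict.items() if 0 < item[1] < highest),
--                     key=lambda item: item[1], reverse=True)
--     return priority, [item[0] for item in middle]
-- ===== Notes on version B (the rewrite author's own statement) =====
-- stated objective: alternative
-- what changed: B replaces A's full descending sort followed by a partition pass with a linear max over the values, an insertion-order filter for the top-valued letters (stable sort keeps equal-key order), and a sort restricted to the strictly-between subset only.
import Mathlib
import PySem

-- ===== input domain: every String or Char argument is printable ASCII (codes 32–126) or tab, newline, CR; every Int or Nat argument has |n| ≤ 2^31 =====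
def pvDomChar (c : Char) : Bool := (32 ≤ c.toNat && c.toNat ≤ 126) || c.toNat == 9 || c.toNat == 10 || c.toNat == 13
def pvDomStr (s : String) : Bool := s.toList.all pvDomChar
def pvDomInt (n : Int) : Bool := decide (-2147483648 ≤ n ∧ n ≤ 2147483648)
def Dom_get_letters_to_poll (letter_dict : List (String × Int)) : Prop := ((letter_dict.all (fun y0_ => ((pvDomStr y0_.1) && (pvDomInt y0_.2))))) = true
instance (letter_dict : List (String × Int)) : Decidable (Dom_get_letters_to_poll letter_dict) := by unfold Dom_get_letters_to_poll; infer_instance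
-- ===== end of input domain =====

-- B finds the max linearly, takes top-valued keys in insertion order, and sorts only the
-- strictly-between-0-and-max items, instead of A's full descending sort plus partition pass.


-- ===== PORT A =====
def get_letters_to_poll (letter_dict : List (String × Int)) : List String × List String :=
  let sort_letters := PySem.List.sorted letter_dict (fun x => x.2) true
  match sort_letters with
  | [] => ([], [])   -- Python: sort_letters[0] raises IndexError here; excluded by Pre_
  | h :: _ =>
    let highest := h.2
    if highest = 0 then ([], [])
    else
      sort_letters.foldl (fun acc letter =>
        if letter.2 = highest then (acc.1 ++ [letter.1], acc.2)
        else if 0 < letter.2 then (acc.1, acc.2 ++ [letter.1])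
        else acc) (([], []) : List String × List String)

-- ===== PORT B =====
def get_letters_to_poll_alt (letter_dict : List (String × Int)) : List String × List String :=
  match PySem.List.max? (letter_dict.map Prod.snd) (fun v => v) with
  | none => ([], [])   -- Python: max() raises ValueError on an empty dict; excluded by Pre_
  | some highest =>
    if highest = 0 then ([], [])
    else
      let priority := (letter_dict.filter (fun kv => kv.2 == highest)).map Prod.fst
      let middle := PySem.List.sorted
        (letter_dict.filter (fun kv => decide (0 < kv.2) && decide (kv.2 < highest)))
        (fun kv => kv.2) true
      (priority, middle.map Prod.fst)

-- ===== PRECONDITION & SPEC =====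
-- Pre_ excludes the empty dict, on which A raises IndexError (and B raises ValueError), and
-- association lists with duplicate keys, which do not represent a Python dict.
def Pre_get_letters_to_poll (letter_dict : List (String × Int)) : Prop :=
  letter_dict ≠ [] ∧ (letter_dict.map Prod.fst).Nodup
instance (letter_dict : List (String × Int)) : Decidable (Pre_get_letters_to_poll letter_dict) := by
  unfold Pre_get_letters_to_poll; infer_instance

def pvWitness_get_letters_to_poll : (List (String × Int)) := [("a", 3), ("b", 1), ("c", 3), ("d", 0), ("e", -2)]

def Spec_get_letters_to_poll (letter_dict : List (String × Int)) (out : List String × List String) : Prop := out = get_letters_to_poll_alt letter_dict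
instance (letter_dict : List (String × Int)) (out : List String × List String) : Decidable (Spec_get_letters_to_poll letter_dict out) := by unfold Spec_get_letters_to_poll; infer_instance

-- ===== CLAIM (what is proved, stated in full; the proofs are below) =====
def Claim_equal_get_letters_to_poll : Prop := ∀ (letter_dict : List (String × Int)), Dom_get_letters_to_poll letter_dict → Pre_get_letters_to_poll letter_dict → Spec_get_letters_to_poll letter_dict (get_letters_to_poll letter_dict)

-- ===== LEMMAS AND PROOFS =====

-- insertBy with the reverse-sort comparison preserves descending order
theorem pv_insertBy_pairwise {α κ : Type} [LinearOrder κ] (key : α → κ) (x : α) (acc : List α)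
    (h : acc.Pairwise (fun a b => key b ≤ key a)) :
    (PySem.List.insertBy (fun a b => decide (key b < key a)) x acc).Pairwise (fun a b => key b ≤ key a) := by
  induction acc with
  | nil => simp [PySem.List.insertBy]
  | cons y ys ih =>
    rw [List.pairwise_cons] at h
    simp only [PySem.List.insertBy]
    split
    · rename_i hlt
      simp only [decide_eq_true_eq] at hlt
      refine List.pairwise_cons.2 ⟨?_, List.pairwise_cons.2 ⟨h.1, h.2⟩⟩
      intro z hz
      rcases List.mem_cons.1 hz with rfl | hz
      · exact le_of_lt hlt
      · exact le_trans (h.1 z hz) (le_of_lt hlt)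
    · rename_i hge
      simp only [decide_eq_true_eq, not_lt] at hge
      refine List.pairwise_cons.2 ⟨?_, ih h.2⟩
      intro z hz
      rw [PySem.List.mem_insertBy] at hz
      rcases hz with rfl | hz
      · exact hge
      · exact h.1 z hz

-- filtering by a key-measurable predicate commutes with inserting into a descending list
theorem pv_filter_insertBy {α κ : Type} [LinearOrder κ] (key : α → κ) (q : κ → Bool) (x : α)
    (acc : List α) (h : acc.Pairwise (fun a b => key b ≤ key a)) :
    (PySem.List.insertBy (fun a b => decide (key b < key a)) x acc).filter (fun y => q (key y)) =
      if q (key x) then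
        PySem.List.insertBy (fun a b => decide (key b < key a)) x (acc.filter (fun y => q (key y)))
      else acc.filter (fun y => q (key y)) := by
  induction acc with
  | nil =>
    by_cases hqx : q (key x) = true <;> simp [PySem.List.insertBy, List.filter, hqx]
  | cons y ys ih =>
    rw [List.pairwise_cons] at h
    simp only [PySem.List.insertBy]
    by_cases hlt : key y < key x
    · rw [if_pos (by simpa using hlt)]
      by_cases hqx : q (key x) = true
      · rw [if_pos hqx, List.filter_cons_of_pos (p := fun y => q (key y)) hqx]
        have hfront : ∀ (l : List α), (∀ z ∈ l, key z < key x) →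
            PySem.List.insertBy (fun a b => decide (key b < key a)) x l = x :: l := by
          intro l hl
          cases l with
          | nil => simp [PySem.List.insertBy]
          | cons z zs =>
            simp only [PySem.List.insertBy]
            rw [if_pos (by simpa using hl z List.mem_cons_self)]
        rw [hfront]
        intro z hz
        rcases List.mem_cons.1 (List.mem_of_mem_filter hz) with rfl | hz'
        · exact hlt
        · exact lt_of_le_of_lt (h.1 z hz') hlt
      · rw [if_neg hqx, List.filter_cons_of_neg (p := fun y => q (key y)) hqx]
    · rw [if_neg (by simpa using hlt)]
      by_cases hqy : q (key y) = true
      · rw [List.filter_cons_of_pos (p := fun y => q (key y)) hqy, List.filter_cons_of_pos (p := fun y => q (key y)) hqy, ih h.2]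
        by_cases hqx : q (key x) = true
        · rw [if_pos hqx, if_pos hqx]
          conv_rhs => rw [PySem.List.insertBy]
          rw [if_neg (by simpa using hlt)]
        · rw [if_neg hqx, if_neg hqx]
      · rw [List.filter_cons_of_neg (p := fun y => q (key y)) hqy, List.filter_cons_of_neg (p := fun y => q (key y)) hqy, ih h.2]

-- filtering by a key-measurable predicate commutes with the stable reverse sort
theorem pv_filter_sorted_rev {α κ : Type} [LinearOrder κ] (key : α → κ) (q : κ → Bool) (xs : List α) :
    (PySem.List.sorted xs key true).filter (fun y => q (key y)) =
      PySem.List.sorted (xs.filter (fun y => q (key y))) key true := by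
  rw [PySem.List.sorted_rev_eq_foldl_insertBy, PySem.List.sorted_rev_eq_foldl_insertBy]
  suffices h : ∀ (acc : List α), acc.Pairwise (fun a b => key b ≤ key a) →
      (xs.foldl (fun acc x => PySem.List.insertBy (fun a b => decide (key b < key a)) x acc) acc).filter (fun y => q (key y)) =
      (xs.filter (fun y => q (key y))).foldl (fun acc x => PySem.List.insertBy (fun a b => decide (key b < key a)) x acc) (acc.filter (fun y => q (key y))) by
    simpa using h [] (by simp)
  induction xs with
  | nil => intro acc _; simp
  | cons x xs ih =>
    intro acc hacc
    simp only [List.foldl_cons, List.filter_cons]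
    rw [ih _ (pv_insertBy_pairwise key x acc hacc), pv_filter_insertBy key q x acc hacc]
    by_cases hqx : q (key x)
    · simp [hqx]
    · simp [hqx]

-- a list all of whose keys are equal is descending
theorem pv_pairwise_of_const {α κ : Type} [LinearOrder κ] (key : α → κ) (c : κ) (l : List α)
    (h : ∀ x ∈ l, key x = c) : l.Pairwise (fun a b => key b ≤ key a) := by
  induction l with
  | nil => exact List.Pairwise.nil
  | cons x xs ih =>
    refine List.pairwise_cons.2 ⟨?_, ih (fun y hy => h y (List.mem_cons_of_mem _ hy))⟩
    intro y hy
    rw [h x List.mem_cons_self, h y (List.mem_cons_of_mem _ hy)]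

-- ===== VERDICT (by name: the statement is the Claim_ definition above) =====
theorem get_letters_to_poll_spec : Claim_equal_get_letters_to_poll := by
  intro ld _ hpre
  obtain ⟨hne, _⟩ := hpre
  unfold Spec_get_letters_to_poll get_letters_to_poll get_letters_to_poll_alt
  -- the sorted list is nonempty
  have hSne : PySem.List.sorted ld (fun x => x.2) true ≠ [] := by
    rw [Ne, PySem.List.sorted_eq_nil_iff]; exact hne
  obtain ⟨h, t, hS⟩ := List.exists_cons_of_ne_nil hSne
  -- max? returns some
  have hMne : ld.map Prod.snd ≠ [] := by simpa using hne
  obtain ⟨m, hm⟩ : ∃ m, PySem.List.max? (ld.map Prod.snd) (fun v => v) = some m := by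
    cases hmax : PySem.List.max? (ld.map Prod.snd) (fun v => v) with
    | none => exact absurd ((PySem.List.max?_eq_none_iff _ _).1 hmax) hMne
    | some m => exact ⟨m, rfl⟩
  -- h.2 = m
  have hhm : h.2 = m := by
    have h1 : ∀ y ∈ ld, y.2 ≤ h.2 := by
      intro y hy
      exact PySem.List.key_head_sorted_rev_ge ld (fun x => x.2) hS y hy
    have hmem : m ∈ ld.map Prod.snd := PySem.List.max?_mem hm
    obtain ⟨kv, hkv, hkv2⟩ := List.mem_map.1 hmem
    have h2 : ∀ v ∈ ld.map Prod.snd, v ≤ m := fun v hv => PySem.List.max?_isMax hm v hv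
    have hh : h ∈ ld := by
      have : h ∈ PySem.List.sorted ld (fun x => x.2) true := by rw [hS]; exact List.mem_cons_self
      exact (PySem.List.mem_sorted _ _ _ _).1 this
    exact le_antisymm (h2 h.2 (List.mem_map.2 ⟨h, hh, rfl⟩)) (hkv2 ▸ h1 kv hkv)
  simp only [hS, hm, hhm]
  by_cases hz : m = 0
  · simp [hz]
  · rw [if_neg hz, if_neg hz]
    rw [← hS]
    -- split the paired fold into two folds
    have hsplit : (PySem.List.sorted ld (fun x => x.2) true).foldl (fun acc letter =>
        if letter.2 = m then (acc.1 ++ [letter.1], acc.2)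
        else if 0 < letter.2 then (acc.1, acc.2 ++ [letter.1])
        else acc) (([], []) : List String × List String) =
        ((PySem.List.sorted ld (fun x => x.2) true).foldl
            (fun acc (letter : String × Int) => if letter.2 = m then acc ++ [letter.1] else acc) [],
         (PySem.List.sorted ld (fun x => x.2) true).foldl
            (fun acc (letter : String × Int) => if letter.2 ≠ m ∧ 0 < letter.2 then acc ++ [letter.1] else acc) []) := by
      rw [← PySem.List.foldl_prod_mk
            (f := fun acc (letter : String × Int) => if letter.2 = m then acc ++ [letter.1] else acc)
            (g := fun acc (letter : String × Int) => if letter.2 ≠ m ∧ 0 < letter.2 then acc ++ [letter.1] else acc)]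
      apply PySem.List.foldl_congr_mem
      intro acc x _
      by_cases h1 : x.2 = m
      · simp [h1]
      · by_cases h2 : 0 < x.2 <;> simp [h1, h2]
    rw [hsplit]
    rw [PySem.List.foldl_append_ite (p := fun (letter : String × Int) => letter.2 = m) (f := Prod.fst),
        PySem.List.foldl_append_ite (p := fun (letter : String × Int) => letter.2 ≠ m ∧ 0 < letter.2) (f := Prod.fst)]
    simp only [List.nil_append]
    rw [Prod.mk.injEq]
    constructor
    -- priority component
    · have hcomm := pv_filter_sorted_rev (fun x : String × Int => x.2) (fun v => decide (v = m)) ld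
      rw [hcomm]
      have hconst : ∀ x ∈ ld.filter (fun y : String × Int => decide (y.2 = m)), x.2 = m := by
        intro x hx
        have := List.of_mem_filter hx
        simpa using this
      rw [PySem.List.sorted_rev_eq_self_of_pairwise _ _ (pv_pairwise_of_const (fun x : String × Int => x.2) m _ hconst)]
      congr 1
    -- other component
    · have hcomm := pv_filter_sorted_rev (fun x : String × Int => x.2) (fun v => decide (v ≠ m ∧ 0 < v)) ld
      rw [hcomm]
      congr 2
      apply List.filter_congr
      intro x hx
      have hle : x.2 ≤ m := PySem.List.max?_isMax hm x.2 (List.mem_map.2 ⟨x, hx, rfl⟩)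
      have hiff : (x.2 ≠ m ∧ 0 < x.2) ↔ (0 < x.2 ∧ x.2 < m) := by
        constructor
        · rintro ⟨hne', hpos⟩; exact ⟨hpos, lt_of_le_of_ne hle hne'⟩
        · rintro ⟨hpos, hlt⟩; exact ⟨ne_of_lt hlt, hpos⟩
      simp [hiff, Bool.decide_and]
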